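-- pv_equiv track=rewrite | github.com/Protonk/BIDDER | experiments/acm-champernowne/base10/art/q_distillery/q_loom.py | ordered_factorisations
-- ===== SOURCE A (Python) =====
-- def ordered_factorisations(x, j):
--     """All ordered j-tuples (a_1, …, a_j) of positive integers with product x."""
--     if j == 1:
--         return [(x,)]
--     out = []
--     for a in range(1, x + 1):
--         if x % a == 0:
--             for tail in ordered_factorisations(x // a, j - 1):
--                 out.append((a,) + tail)
--     return out
-- ===== SOURCE B (Python) =====
-- def _divisors_sorted(x):
--     """Divisors of x in ascending order via a small/large cofactor sweep up to sqrt(x)."""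
--     small = []
--     large = []
--     d = 1
--     while d * d <= x:
--         if x % d == 0:
--             small.append(d)
--             if d * d != x:
--                 large.append(x // d)
--         d += 1
--     return small + large[::-1]
--
--
-- def ordered_factorisations(x, j):
--     """All ordered j-tuples (a_1, …, a_j) of positive integers with product x."""
--     if j == 1:
--         return [(x,)]
--     return [(a,) + tail
--             for a in _divisors_sorted(x)
--             for tail in ordered_factorisations(x // a, j - 1)]
-- ===== Notes on version B (the rewrite author's own statement) =====
-- stated objective: alternative
-- what changed: B finds the candidate first factors with an O(sqrt(x)) small-divisor/large-cofactor sweep instead of A's trial scan of all of range(1, x+1) at every recursion node, and assembles the tuples with a comprehension over that divisor list rather than an accumulator loop with a divisibility test.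
import Mathlib
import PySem

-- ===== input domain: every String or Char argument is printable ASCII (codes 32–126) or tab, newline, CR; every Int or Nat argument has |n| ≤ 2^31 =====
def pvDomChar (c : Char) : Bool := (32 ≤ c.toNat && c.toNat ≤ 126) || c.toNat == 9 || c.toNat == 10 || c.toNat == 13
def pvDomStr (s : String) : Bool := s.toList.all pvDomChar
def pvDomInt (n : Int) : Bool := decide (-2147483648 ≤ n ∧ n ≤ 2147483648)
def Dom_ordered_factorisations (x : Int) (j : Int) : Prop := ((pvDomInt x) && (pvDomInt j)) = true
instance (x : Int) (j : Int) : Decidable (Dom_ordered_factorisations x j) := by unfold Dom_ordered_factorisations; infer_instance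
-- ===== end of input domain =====

-- B replaces A's trial scan of all of range(1, x+1) per recursion node by a single
-- small-divisor/large-cofactor sweep up to sqrt(x) producing the divisors in ascending
-- order, and builds the tuples by a comprehension over that list (no timing claim made).

-- ===== PORT A =====
-- Python's recursion on j is modelled with fuel (j-1).toNat: inside Pre_ (j ≥ 1, or x ≤ 0,
-- where the loop body never runs) the fuel is never exhausted on a path Python takes.
def ofGoA (x : Int) (j : Int) : Nat → List (List Int)
  | 0 =>
    if j = 1 then [[x]] else []
  | Nat.succ f =>
    if j = 1 then [[x]]
    else
      (PySem.List.pyRange 1 (x + 1) 1).foldl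
        (fun out a =>
          if PySem.Int.mod x a = 0 then
            out ++ (ofGoA (PySem.Int.floordiv x a) (j - 1) f).map (fun t => a :: t)
          else out) []

def ordered_factorisations (x : Int) (j : Int) : List (List Int) :=
  ofGoA x j (j - 1).toNat

-- ===== PORT B =====
-- the while loop of _divisors_sorted, fuel x.toNat (enough: it runs at most sqrt(x) ≤ x times,
-- and once the loop would stop, running out of fuel returns the same ([], []) the exit returns)
def divGo (x : Int) (d : Int) : Nat → List Int × List Int
  | 0 => ([], [])
  | Nat.succ f =>
    if d * d ≤ x then
      let rest := divGo x (d + 1) f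
      if PySem.Int.mod x d = 0 then
        (d :: rest.1,
         if d * d ≠ x then PySem.Int.floordiv x d :: rest.2 else rest.2)
      else rest
    else ([], [])

def divisorsSorted (x : Int) : List Int :=
  let sl := divGo x 1 x.toNat
  sl.1 ++ sl.2.reverse

-- the nested list comprehension of Source B is a flatMap of a map
def ofGoB (x : Int) (j : Int) : Nat → List (List Int)
  | 0 =>
    if j = 1 then [[x]] else []
  | Nat.succ f =>
    if j = 1 then [[x]]
    else
      (divisorsSorted x).flatMap
        (fun a => (ofGoB (PySem.Int.floordiv x a) (j - 1) f).map (fun t => a :: t))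

def ordered_factorisations_alt (x : Int) (j : Int) : List (List Int) :=
  ofGoB x j (j - 1).toNat

-- ===== PRECONDITION & SPEC =====
-- Pre_ excludes j ≤ 0 with 1 ≤ x, where A (and B alike) recurse without bound and Python raises RecursionError.
def Pre_ordered_factorisations (x : Int) (j : Int) : Prop := 1 ≤ j ∨ x ≤ 0
instance (x : Int) (j : Int) : Decidable (Pre_ordered_factorisations x j) := by unfold Pre_ordered_factorisations; infer_instance

def pvWitness_ordered_factorisations : Int × Int := (12, 3)

def Spec_ordered_factorisations (x : Int) (j : Int) (out : List (List Int)) : Prop := out = ordered_factorisations_alt x j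
instance (x : Int) (j : Int) (out : List (List Int)) : Decidable (Spec_ordered_factorisations x j out) := by unfold Spec_ordered_factorisations; infer_instance

-- ===== CLAIM (what is proved, stated in full; the proofs are below) =====
def Claim_equal_ordered_factorisations : Prop := ∀ (x : Int) (j : Int), Dom_ordered_factorisations x j → Pre_ordered_factorisations x j → Spec_ordered_factorisations x j (ordered_factorisations x j)

-- ===== LEMMAS AND PROOFS =====

-- closed forms for the two components of divGo: divisors of x in [d, √x], and the
-- cofactors of those strictly below √x, in order of discovery
def smallOf (x d : Int) : List Int :=
  (PySem.List.pyRange d (x + 1) 1).filter (fun a => decide (a * a ≤ x ∧ PySem.Int.mod x a = 0))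

def largeOf (x d : Int) : List Int :=
  ((PySem.List.pyRange d (x + 1) 1).filter
      (fun a => decide (a * a < x ∧ PySem.Int.mod x a = 0))).map (fun a => PySem.Int.floordiv x a)

-- filters over an empty tail range

theorem smallOf_nil (x d : Int) (h : ¬ d * d ≤ x) (hd : 1 ≤ d) : smallOf x d = [] := by
  unfold smallOf
  apply List.filter_eq_nil_iff.mpr
  intro a ha
  rw [PySem.List.mem_pyRange_one] at ha
  have : ¬ a * a ≤ x := by nlinarith [ha.1]
  simp [this]

theorem largeOf_nil (x d : Int) (h : ¬ d * d ≤ x) (hd : 1 ≤ d) : largeOf x d = [] := by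
  unfold largeOf
  have : ((PySem.List.pyRange d (x + 1) 1).filter
      (fun a => decide (a * a < x ∧ PySem.Int.mod x a = 0))) = [] := by
    apply List.filter_eq_nil_iff.mpr
    intro a ha
    rw [PySem.List.mem_pyRange_one] at ha
    have : ¬ a * a < x := by nlinarith [ha.1]
    simp [this]
  rw [this]; rfl

theorem divGo_spec (x : Int) (hx : 1 ≤ x) :
    ∀ (fuel : Nat) (d : Int), 1 ≤ d → (x + 1 - d).toNat ≤ fuel →
      divGo x d fuel = (smallOf x d, largeOf x d) := by
  intro fuel
  induction fuel with
  | zero =>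
    intro d hd hf
    have hdx : x + 1 ≤ d := by omega
    have h : ¬ d * d ≤ x := by nlinarith
    simp [divGo, smallOf_nil x d h hd, largeOf_nil x d h hd]
  | succ f ih =>
    intro d hd hf
    by_cases h : d * d ≤ x
    · have hdx : d ≤ x := by nlinarith
      have hcons : PySem.List.pyRange d (x + 1) 1 = d :: PySem.List.pyRange (d + 1) (x + 1) 1 :=
        PySem.List.pyRange_one_cons (by omega)
      have hrec := ih (d + 1) (by omega) (by omega)
      by_cases hm : PySem.Int.mod x d = 0
      · by_cases hne : d * d = x
        · simp [divGo, hm, hne, hrec, smallOf, largeOf, hcons]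
        · simp [divGo, h, hm, hne, hrec, smallOf, largeOf, hcons, show d * d < x by omega]
      · simp [divGo, h, hm, hrec, smallOf, largeOf, hcons]
    · simp [divGo, h, smallOf_nil x d h hd, largeOf_nil x d h hd]

theorem mem_small_iff (x : Int) (a : Int) :
    a ∈ smallOf x 1 ↔ 1 ≤ a ∧ a * a ≤ x ∧ a ∣ x := by
  unfold smallOf
  simp only [List.mem_filter, PySem.List.mem_pyRange_one, decide_eq_true_eq]
  constructor
  · rintro ⟨⟨h1, _⟩, h2, h3⟩
    exact ⟨h1, h2, (PySem.Int.mod_eq_zero_iff_dvd x a).mp h3⟩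
  · rintro ⟨h1, h2, h3⟩
    refine ⟨⟨h1, by nlinarith⟩, h2, (PySem.Int.mod_eq_zero_iff_dvd x a).mpr h3⟩

theorem cofactor_facts (x a : Int) (hx : 1 ≤ x) (ha : 1 ≤ a) (hd : a ∣ x) :
    1 ≤ x / a ∧ (x / a) ∣ x ∧ a * (x / a) = x ∧ x / (x / a) = a := by
  have hax : a ≤ x := Int.le_of_dvd (by omega) hd
  have hmul : a * (x / a) = x := Int.mul_ediv_cancel' hd
  have h1 : 1 ≤ x / a := by
    rcases lt_or_ge (x / a) 1 with h | h
    · nlinarith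
    · exact h
  refine ⟨h1, ⟨a, by linarith [hmul, mul_comm a (x / a)]⟩, hmul, ?_⟩
  have : (x / a) * a = x := by linarith [mul_comm a (x / a)]
  calc x / (x / a) = ((x / a) * a) / (x / a) := by rw [this]
    _ = a := Int.mul_ediv_cancel_left a (by omega)

theorem mem_large_iff (x : Int) (hx : 1 ≤ x) (t : Int) :
    t ∈ largeOf x 1 ↔ 1 ≤ t ∧ x < t * t ∧ t ∣ x := by
  unfold largeOf
  simp only [List.mem_map, List.mem_filter, PySem.List.mem_pyRange_one, decide_eq_true_eq]
  constructor
  · rintro ⟨a, ⟨⟨ha1, _⟩, haa, ham⟩, rfl⟩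
    have hd : a ∣ x := (PySem.Int.mod_eq_zero_iff_dvd x a).mp ham
    obtain ⟨h1, h2, h3, _⟩ := cofactor_facts x a hx ha1 hd
    rw [PySem.Int.floordiv_eq_ediv_of_pos (by omega)]
    refine ⟨h1, by nlinarith, h2⟩
  · rintro ⟨ht1, htt, htd⟩
    obtain ⟨h1, h2, h3, h4⟩ := cofactor_facts x t hx ht1 htd
    refine ⟨x / t, ⟨⟨h1, ?_⟩, ?_, (PySem.Int.mod_eq_zero_iff_dvd x (x / t)).mpr h2⟩, ?_⟩
    · nlinarith
    · nlinarith
    · rw [PySem.Int.floordiv_eq_ediv_of_pos (by omega), h4]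

theorem sorted_small (x : Int) : (smallOf x 1).Pairwise (· < ·) :=
  (PySem.List.pairwise_lt_pyRange_one 1 (x + 1)).filter _

theorem sorted_large_rev (x : Int) (hx : 1 ≤ x) :
    ((largeOf x 1).reverse).Pairwise (· < ·) := by
  rw [List.pairwise_reverse]
  unfold largeOf
  rw [List.pairwise_map]
  have base : ((PySem.List.pyRange 1 (x + 1) 1).filter
      (fun a => decide (a * a < x ∧ PySem.Int.mod x a = 0))).Pairwise (· < ·) :=
    (PySem.List.pairwise_lt_pyRange_one 1 (x + 1)).filter _
  refine base.imp_of_mem ?_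
  intro a b ha hb hab
  simp only [List.mem_filter, PySem.List.mem_pyRange_one, decide_eq_true_eq] at ha hb
  obtain ⟨⟨ha1, _⟩, _, ham⟩ := ha
  obtain ⟨⟨hb1, _⟩, _, hbm⟩ := hb
  obtain ⟨ha1', _, hamul, _⟩ := cofactor_facts x a hx ha1 ((PySem.Int.mod_eq_zero_iff_dvd x a).mp ham)
  obtain ⟨hb1', _, hbmul, _⟩ := cofactor_facts x b hx hb1 ((PySem.Int.mod_eq_zero_iff_dvd x b).mp hbm)
  rw [PySem.Int.floordiv_eq_ediv_of_pos (by omega), PySem.Int.floordiv_eq_ediv_of_pos (by omega)]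
  rcases lt_or_ge (x / b) (x / a) with h | h
  · exact h
  · nlinarith

theorem divisors_filter_eq (x : Int) :
    (PySem.List.pyRange 1 (x + 1) 1).filter (fun a => decide (PySem.Int.mod x a = 0))
      = smallOf x 1 ++ (largeOf x 1).reverse := by
  rcases (show x ≤ 0 ∨ 0 < x by omega) with hx | hx
  · rw [PySem.List.pyRange_one_eq_nil (by omega)]
    unfold smallOf largeOf
    rw [PySem.List.pyRange_one_eq_nil (by omega)]
    rfl
  · have hx1 : 1 ≤ x := hx
    -- both sides: sorted (<) and same membership
    have sortedL : ((PySem.List.pyRange 1 (x + 1) 1).filter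
        (fun a => decide (PySem.Int.mod x a = 0))).Pairwise (· < ·) :=
      (PySem.List.pairwise_lt_pyRange_one 1 (x + 1)).filter _
    have sortedR : (smallOf x 1 ++ (largeOf x 1).reverse).Pairwise (· < ·) := by
      rw [List.pairwise_append]
      refine ⟨sorted_small x, sorted_large_rev x hx1, ?_⟩
      intro s hs t ht
      rw [mem_small_iff] at hs
      rw [List.mem_reverse, mem_large_iff x hx1] at ht
      nlinarith [hs.1, hs.2.1, ht.1, ht.2.1]
    have memiff : ∀ a, a ∈ (PySem.List.pyRange 1 (x + 1) 1).filter
        (fun a => decide (PySem.Int.mod x a = 0))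
        ↔ a ∈ smallOf x 1 ++ (largeOf x 1).reverse := by
      intro a
      simp only [List.mem_filter, PySem.List.mem_pyRange_one, decide_eq_true_eq,
        List.mem_append, List.mem_reverse, mem_small_iff, mem_large_iff x hx1]
      constructor
      · rintro ⟨⟨h1, h2⟩, hm⟩
        have hd := (PySem.Int.mod_eq_zero_iff_dvd x a).mp hm
        rcases le_or_gt (a * a) x with h | h
        · exact Or.inl ⟨h1, h, hd⟩
        · exact Or.inr ⟨h1, h, hd⟩
      · rintro (⟨h1, h2, hd⟩ | ⟨h1, h2, hd⟩) <;>
          exact ⟨⟨h1, by have := Int.le_of_dvd (by omega) hd; omega⟩,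
            (PySem.Int.mod_eq_zero_iff_dvd x a).mpr hd⟩
    have ndL : ((PySem.List.pyRange 1 (x + 1) 1).filter
        (fun a => decide (PySem.Int.mod x a = 0))).Nodup := sortedL.imp ne_of_lt
    have ndR : (smallOf x 1 ++ (largeOf x 1).reverse).Nodup := sortedR.imp ne_of_lt
    exact List.Perm.eq_of_pairwise
      (fun a b _ _ h1 h2 => absurd h1 (lt_asymm h2))
      sortedL sortedR ((List.perm_ext_iff_of_nodup ndL ndR).mpr memiff)

theorem divisorsSorted_eq (x : Int) :
    divisorsSorted x
      = (PySem.List.pyRange 1 (x + 1) 1).filter (fun a => decide (PySem.Int.mod x a = 0)) := by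
  rcases (show x ≤ 0 ∨ 1 ≤ x by omega) with hx | hx
  · have h0 : x.toNat = 0 := by omega
    rw [PySem.List.pyRange_one_eq_nil (by omega)]
    simp [divisorsSorted, h0, divGo]
  · have := divGo_spec x hx x.toNat 1 (by omega) (by omega)
    rw [divisors_filter_eq x]
    simp [divisorsSorted, this]

theorem flatMap_if_filter (x : Int) (l : List Int) (g : Int → List (List Int)) :
    (l.flatMap fun a => if PySem.Int.mod x a = 0 then g a else [])
      = (l.filter (fun a => decide (PySem.Int.mod x a = 0))).flatMap g := by
  induction l with
  | nil => rfl
  | cons b t ih =>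
    simp only [List.flatMap_cons, List.filter_cons]
    split <;> simp_all

theorem goA_eq_goB : ∀ (fuel : Nat) (x j : Int), ofGoA x j fuel = ofGoB x j fuel := by
  intro fuel
  induction fuel with
  | zero => intro x j; rfl
  | succ f ih =>
    intro x j
    by_cases hj : j = 1
    · simp [ofGoA, ofGoB, hj]
    · have hA : (fun (out : List (List Int)) (a : Int) =>
          if PySem.Int.mod x a = 0 then
            out ++ (ofGoA (PySem.Int.floordiv x a) (j - 1) f).map (fun t => a :: t)
          else out)
        = (fun out a => out ++ (if PySem.Int.mod x a = 0 then
            (ofGoA (PySem.Int.floordiv x a) (j - 1) f).map (fun t => a :: t) else [])) := by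
        funext out a; split <;> simp
      simp only [ofGoA, ofGoB, hj, if_false, hA,
        PySem.List.foldl_append_eq_flatMap, List.nil_append]
      rw [flatMap_if_filter, divisorsSorted_eq]
      apply List.flatMap_congr
      intro a _
      rw [ih]

-- ===== VERDICT (by name: the statement is the Claim_ definition above) =====
theorem ordered_factorisations_spec : Claim_equal_ordered_factorisations := by
  intro x j _ _
  unfold Spec_ordered_factorisations ordered_factorisations ordered_factorisations_alt
  exact goA_eq_goB _ x j
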